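-- pv_equiv track=rewrite | github.com/MylesJP/packastack | src/packastack/planning/targets.py | _is_valid_ident_body
-- ===== SOURCE A (Python) =====
-- def _is_valid_ident_body(value: str) -> bool:
--     """Return True if value contains only allowed IDENT characters."""
--
--     for ch in value:
--         if not (
--             "A" <= ch <= "Z"
--             or "a" <= ch <= "z"
--             or "0" <= ch <= "9"
--             or ch in {".", "_", "+", "-", "/", "^", "~", "*"}
--         ):
--             return False
--     return True
-- ===== SOURCE B (Python) =====
-- _ALLOWED = (
--     "ABCDEFGHIJKLMNOPQRSTUVWXYZ"
--     "abcdefghijklmnopqrstuvwxyz"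
--     "0123456789"
--     "._+-/^~*"
-- )
--
--
-- def _is_valid_ident_body(value: str) -> bool:
--     """Return True if value contains only allowed IDENT characters."""
--     # str.strip(chars) removes allowed characters from both ends and stops at
--     # the first disallowed one, so the result is empty iff every character of
--     # value is allowed.
--     return not value.strip(_ALLOWED)
-- ===== Notes on version B (the rewrite author's own statement) =====
-- stated objective: idiomatic
-- what changed: Instead of testing each character in a short-circuiting loop, B strips allowed characters from both ends with str.strip(_ALLOWED) and returns whether the remainder is empty, which is correct because stripping stops at the first disallowed character from either side; the work moves into one C-level str.strip call.
import Mathlib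
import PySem

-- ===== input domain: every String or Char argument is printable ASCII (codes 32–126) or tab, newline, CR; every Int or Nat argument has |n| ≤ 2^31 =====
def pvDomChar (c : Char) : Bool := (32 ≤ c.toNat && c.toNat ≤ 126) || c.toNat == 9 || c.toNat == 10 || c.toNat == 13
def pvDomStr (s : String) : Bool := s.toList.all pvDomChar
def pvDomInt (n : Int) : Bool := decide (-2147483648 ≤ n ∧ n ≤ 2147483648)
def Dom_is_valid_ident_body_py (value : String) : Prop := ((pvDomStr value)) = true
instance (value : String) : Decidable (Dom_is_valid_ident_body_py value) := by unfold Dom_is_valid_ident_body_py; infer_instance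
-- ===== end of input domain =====

-- B replaces A's per-character short-circuiting loop with Python's str.strip over the allowed
-- alphabet followed by an emptiness test (idiomatic; same O(n) cost).


-- ===== PORT A =====
-- the 'for ch in value' loop: test each character in order, early-return False
def pyIdentLoop : List Char → Bool
  | [] => true
  | ch :: rest =>
    if ¬ (('A' ≤ ch ∧ ch ≤ 'Z') ∨ ('a' ≤ ch ∧ ch ≤ 'z') ∨ ('0' ≤ ch ∧ ch ≤ '9')
        ∨ PySem.Set.contains (PySem.Set.ofList ['.', '_', '+', '-', '/', '^', '~', '*']) ch = true)
    then false
    else pyIdentLoop rest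

def is_valid_ident_body_py (value : String) : Bool := pyIdentLoop value.toList

-- ===== PORT B =====
-- the module-level string constant _ALLOWED
def pyAllowedStr : String :=
  "ABCDEFGHIJKLMNOPQRSTUVWXYZabcdefghijklmnopqrstuvwxyz0123456789._+-/^~*"

-- 'not value.strip(_ALLOWED)': strip allowed characters from both ends, test emptiness
def is_valid_ident_body_py_alt (value : String) : Bool :=
  PySem.Str.stripChars value pyAllowedStr == ""

-- ===== PRECONDITION & SPEC =====
def Spec_is_valid_ident_body_py (value : String) (out : Bool) : Prop := out = is_valid_ident_body_py_alt value
instance (value : String) (out : Bool) : Decidable (Spec_is_valid_ident_body_py value out) := by unfold Spec_is_valid_ident_body_py; infer_instance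

-- ===== CLAIM (what is proved, stated in full; the proofs are below) =====
def Claim_equal_is_valid_ident_body_py : Prop := ∀ (value : String), Dom_is_valid_ident_body_py value → Spec_is_valid_ident_body_py value (is_valid_ident_body_py value)

-- ===== LEMMAS AND PROOFS =====
set_option maxRecDepth 4000 in
-- on the printable-ASCII domain A's per-character test agrees with membership in _ALLOWED
theorem char_cond_eq (c : Char) (hc : pvDomChar c = true) :
    (decide (('A' ≤ c ∧ c ≤ 'Z') ∨ ('a' ≤ c ∧ c ≤ 'z') ∨ ('0' ≤ c ∧ c ≤ '9')
       ∨ PySem.Set.contains (PySem.Set.ofList ['.', '_', '+', '-', '/', '^', '~', '*']) c = true))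
    = pyAllowedStr.toList.contains c := by
  have hb : c.toNat ≤ 126 := by
    unfold pvDomChar at hc
    simp only [Bool.or_eq_true, Bool.and_eq_true, decide_eq_true_eq, beq_iff_eq] at hc
    omega
  obtain ⟨n, hn, rfl⟩ : ∃ n, n ≤ 126 ∧ c = Char.ofNat n :=
    ⟨c.toNat, hb, (Char.ofNat_toNat c).symm⟩
  interval_cases n <;> decide

-- A's loop returns True iff every character is in _ALLOWED
theorem pyIdentLoop_eq_all (l : List Char) (hd : l.all pvDomChar = true) :
    pyIdentLoop l = l.all (fun x => pyAllowedStr.toList.contains x) := by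
  induction l with
  | nil => rfl
  | cons c rest ih =>
    rw [List.all_cons, Bool.and_eq_true] at hd
    rw [pyIdentLoop, List.all_cons, ← char_cond_eq c hd.1]
    by_cases h : (('A' ≤ c ∧ c ≤ 'Z') ∨ ('a' ≤ c ∧ c ≤ 'z') ∨ ('0' ≤ c ∧ c ≤ '9')
       ∨ PySem.Set.contains (PySem.Set.ofList ['.', '_', '+', '-', '/', '^', '~', '*']) c = true)
    · rw [if_neg (not_not_intro h), decide_eq_true h, Bool.true_and, ih hd.2]
    · rw [if_pos h, decide_eq_false h, Bool.false_and]

-- stripping p-characters from both ends yields [] iff every character satisfies p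
theorem strip_both_nil_iff (p : Char → Bool) (l : List Char) :
    (List.dropWhile p (List.dropWhile p l).reverse).reverse = [] ↔ (∀ x ∈ l, p x = true) := by
  constructor
  · intro h
    have h2 : List.dropWhile p (List.dropWhile p l).reverse = [] := by
      simpa using congrArg List.reverse h
    have h3 : ∀ x ∈ (List.dropWhile p l).reverse, p x = true :=
      List.dropWhile_eq_nil_iff.1 h2
    have h4 : List.dropWhile p l = [] := by
      cases hdl : List.dropWhile p l with
      | nil => rfl
      | cons a as =>
        have hpa : p a = false := by
          have := List.head?_dropWhile_not p l
          rw [hdl] at this; simpa using this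
        have : p a = true := h3 a (by simp [hdl])
        simp [hpa] at this
    exact List.dropWhile_eq_nil_iff.1 h4
  · intro h
    have h4 : List.dropWhile p l = [] := List.dropWhile_eq_nil_iff.2 h
    simp [h4]

-- ===== VERDICT (by name: the statement is the Claim_ definition above) =====
theorem is_valid_ident_body_py_spec : Claim_equal_is_valid_ident_body_py := by
  intro value hdom
  unfold Spec_is_valid_ident_body_py is_valid_ident_body_py is_valid_ident_body_py_alt
  rw [pyIdentLoop_eq_all value.toList hdom]
  rw [Bool.eq_iff_iff, List.all_eq_true, beq_iff_eq]
  have hlist := strip_both_nil_iff (fun c => pyAllowedStr.toList.contains c) value.toList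
  constructor
  · intro h
    have : (PySem.Str.stripChars value pyAllowedStr).toList = ([] : List Char) := by
      rw [PySem.Str.toList_stripChars, PySem.Chars.stripChars]
      exact hlist.2 h
    cases hs : PySem.Str.stripChars value pyAllowedStr
    simp_all
  · intro h
    apply hlist.1
    have : (PySem.Str.stripChars value pyAllowedStr).toList = ([] : List Char) := by
      rw [h]; rfl
    rw [PySem.Str.toList_stripChars, PySem.Chars.stripChars] at this
    exact this
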